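-- pv_equiv track=rewrite | github.com/Hundredzz/Problem-Solving-Computer-Programming | ping.py | check_ping
-- ===== SOURCE A (Python) =====
-- def check_ping(ping_wip):
--     """ping"""
--     ping_wip = ping_wip[::-1]
--     ip = ""
--     num = 0
--     for i in ping_wip:
--         if not num:
--             if i.isnumeric() or i in (":","."):
--                 num = 1
--                 ip += i
--         elif i.isnumeric() or i in (":","."):
--             ip += i
--         else:
--             break
--     ip = ip[::-1]
--     return ip
-- ===== SOURCE B (Python) =====
-- def check_ping(ping_wip):
--     """ping"""
--     current = ""
--     result = ""
--     for i in ping_wip: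
--         if i.isnumeric() or i in (":", "."):
--             current += i
--         else:
--             if current:
--                 result = current
--             current = ""
--     return current if current else result
-- ===== Notes on version B (the rewrite author's own statement) =====
-- stated objective: alternative
-- what changed: Forward single pass keeping the current run and the last completed run, instead of reversing the string, scanning the reversal with a skip/collect flag and break, and reversing the collected run back.
import Mathlib
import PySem

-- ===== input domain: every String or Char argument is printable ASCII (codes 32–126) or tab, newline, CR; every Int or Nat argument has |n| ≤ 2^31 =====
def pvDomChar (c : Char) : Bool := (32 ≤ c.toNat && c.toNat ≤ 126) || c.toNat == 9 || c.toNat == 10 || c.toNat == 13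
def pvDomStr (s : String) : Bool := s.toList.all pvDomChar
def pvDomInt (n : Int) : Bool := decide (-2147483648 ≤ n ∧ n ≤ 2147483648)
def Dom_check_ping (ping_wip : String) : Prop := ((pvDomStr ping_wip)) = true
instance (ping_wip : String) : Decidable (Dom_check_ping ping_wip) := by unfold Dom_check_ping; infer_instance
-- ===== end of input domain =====

-- ===== PORT A =====
-- B replaces A's reverse/flag-scan/break/reverse with one forward pass keeping the current and last completed run (objective: alternative decomposition).
-- `c.isnumeric()` is ported as `Char.isDigit`: exact on the printable-ASCII domain Dom_check_ping, where the two coincide.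
def pvP (c : Char) : Bool := c.isDigit || c == ':' || c == '.'

-- the `for i in ping_wip` loop of A: state (ip, num); `break` returns ip at once
def pvALoop : List Char → List Char → Bool → List Char
  | [], ip, _ => ip
  | c :: rest, ip, num =>
    if num = false then
      if pvP c then pvALoop rest (ip ++ [c]) true else pvALoop rest ip false
    else
      if pvP c then pvALoop rest (ip ++ [c]) true
      else ip

def check_ping (ping_wip : String) : String :=
  let rev := ping_wip.toList.reverse          -- ping_wip = ping_wip[::-1]
  let ip := pvALoop rev [] false              -- the for-loop, ip = "", num = 0
  String.ofList ip.reverse                    -- ip = ip[::-1]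

-- ===== PORT B =====
-- the `for i in ping_wip` loop of B: state (current, result); after the loop return current if nonempty else result
def pvBLoop : List Char → List Char → List Char → List Char
  | [], cur, res => if cur.isEmpty then res else cur
  | c :: rest, cur, res =>
    if pvP c then pvBLoop rest (cur ++ [c]) res
    else if cur.isEmpty then pvBLoop rest [] res
    else pvBLoop rest [] cur

def check_ping_alt (ping_wip : String) : String :=
  String.ofList (pvBLoop ping_wip.toList [] [])

-- ===== PRECONDITION & SPEC =====
def Spec_check_ping (ping_wip : String) (out : String) : Prop := out = check_ping_alt ping_wip
instance (ping_wip : String) (out : String) : Decidable (Spec_check_ping ping_wip out) := by unfold Spec_check_ping; infer_instance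

-- ===== CLAIM (what is proved, stated in full; the proofs are below) =====
def Claim_equal_check_ping : Prop := ∀ (ping_wip : String), Dom_check_ping ping_wip → Spec_check_ping ping_wip (check_ping ping_wip)

-- ===== LEMMAS AND PROOFS =====

-- the common value: the last maximal run of pvP-characters, read off from the right
def pvS (l : List Char) : List Char :=
  ((l.reverse.dropWhile (fun c => !pvP c)).takeWhile pvP).reverse

theorem pvALoop_true (rev acc : List Char) :
    pvALoop rev acc true = acc ++ rev.takeWhile pvP := by
  induction rev generalizing acc with
  | nil => simp [pvALoop]
  | cons c t ih =>
    by_cases h : pvP c = true <;> simp [pvALoop, h, ih]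

theorem pvALoop_false (rev : List Char) :
    pvALoop rev [] false = (rev.dropWhile (fun c => !pvP c)).takeWhile pvP := by
  induction rev with
  | nil => simp [pvALoop]
  | cons c t ih =>
    by_cases h : pvP c = true
    · simp [pvALoop, h, pvALoop_true]
    · simp [pvALoop, h, ih]

theorem pvTakeWhile_stop (c : Char) (x y : List Char) (hc : ¬ pvP c = true) :
    (x ++ c :: y).takeWhile pvP = x.takeWhile pvP := by
  rw [List.takeWhile_append]
  split_ifs with h
  · have hx : x.takeWhile pvP = x :=
      (List.takeWhile_prefix pvP).eq_of_length h
    rw [List.takeWhile_cons_of_neg (by simpa using hc), hx, List.append_nil]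
  · rfl

theorem pvDropWhile_all (x : List Char) (h : ∀ c ∈ x, pvP c = true) :
    x.dropWhile (fun c => !pvP c) = x := by
  cases x with
  | nil => rfl
  | cons a t => rw [List.dropWhile_cons_of_neg]; simp [h a List.mem_cons_self]

theorem pvDropWhile_none (x : List Char) (h : x.any pvP = false) :
    x.dropWhile (fun c => !pvP c) = [] := by
  rw [List.dropWhile_eq_nil_iff]
  intro c hc
  simp only [List.any_eq_false] at h
  simp [h c hc]

theorem pvDropWhile_ne_nil (x : List Char) (h : x.any pvP = true) :
    (x.dropWhile (fun c => !pvP c)).isEmpty = false := by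
  rcases List.any_eq_true.mp h with ⟨c, hc, hpc⟩
  rw [List.isEmpty_eq_false_iff, Ne, List.dropWhile_eq_nil_iff]
  intro hall
  have := hall c hc
  simp [hpc] at this

-- dropping a last non-run block: the last run of w ++ c :: t is the last run of t, when t has one
theorem pvS_append_last (w t : List Char) (c : Char) (hc : ¬ pvP c = true)
    (ht : t.any pvP = true) : pvS (w ++ c :: t) = pvS t := by
  have hrev : (w ++ c :: t).reverse = t.reverse ++ c :: w.reverse := by
    simp
  have hne : ((t.reverse).dropWhile (fun c => !pvP c)).isEmpty = false :=
    pvDropWhile_ne_nil _ (by simpa using ht)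
  rw [pvS, hrev, List.dropWhile_append, if_neg (by simp [hne]),
    pvTakeWhile_stop c _ _ hc, pvS]

theorem pvBLoop_spec (l cur res : List Char) (hcur : ∀ c ∈ cur, pvP c = true) :
    pvBLoop l cur res = if (cur ++ l).any pvP then pvS (cur ++ l) else res := by
  induction l generalizing cur res with
  | nil =>
    cases cur with
    | nil => simp [pvBLoop]
    | cons a t =>
      have ha : pvP a = true := hcur a List.mem_cons_self
      have h1 : (t.reverse ++ [a]).dropWhile (fun c => !pvP c) = t.reverse ++ [a] := by
        simpa using pvDropWhile_all ((a :: t).reverse)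
          (fun c hcm => hcur c (List.mem_reverse.mp hcm))
      have h2 : (t.reverse ++ [a]).takeWhile pvP = t.reverse ++ [a] := by
        simpa using List.takeWhile_eq_self_iff.mpr
          (fun c hcm => hcur c (List.mem_reverse.mp hcm))
      simp [pvBLoop, pvS, ha, h1, h2]
  | cons c t ih =>
    by_cases hc : pvP c = true
    · have hcur' : ∀ d ∈ cur ++ [c], pvP d = true := by
        intro d hd
        rcases List.mem_append.mp hd with h | h
        · exact hcur d h
        · rw [List.mem_singleton.mp h]; exact hc
      rw [pvBLoop, if_pos hc, ih _ res hcur', List.append_assoc, List.singleton_append]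
    · have hcf : pvP c = false := by simpa using hc
      cases cur with
      | nil =>
        rw [pvBLoop, if_neg hc]
        simp only [List.isEmpty_nil, if_true]
        rw [ih [] res (by simp)]
        simp only [List.nil_append, List.any_cons, hcf, Bool.false_or]
        by_cases hany : t.any pvP = true
        · rw [if_pos hany, if_pos hany, show (c :: t) = ([] : List Char) ++ c :: t from rfl,
            pvS_append_last [] t c hc hany]
        · simp [hany]
      | cons a u =>
        have ha : pvP a = true := hcur a List.mem_cons_self
        rw [pvBLoop, if_neg hc, if_neg (by simp), ih [] (a :: u) (by simp)]
        have hany2 : ((a :: u) ++ c :: t).any pvP = true := by simp [ha]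
        rw [if_pos hany2]
        simp only [List.nil_append]
        by_cases hany : t.any pvP = true
        · rw [if_pos hany, pvS_append_last (a :: u) t c hc hany]
        · have hanyf : t.any pvP = false := by simpa using hany
          rw [if_neg hany]
          have hda : (a :: u).reverse.dropWhile (fun c => !pvP c) = (a :: u).reverse :=
            pvDropWhile_all _ (fun d hd => hcur d (List.mem_reverse.mp hd))
          have hta : (a :: u).reverse.takeWhile pvP = (a :: u).reverse :=
            List.takeWhile_eq_self_iff.mpr (fun d hd => hcur d (List.mem_reverse.mp hd))
          have hdt : t.reverse.dropWhile (fun c => !pvP c) = [] :=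
            pvDropWhile_none _ (by simpa using hanyf)
          rw [pvS, show ((a :: u) ++ c :: t).reverse = t.reverse ++ c :: (a :: u).reverse by simp,
            List.dropWhile_append, hdt]
          simp only [List.isEmpty_nil, if_true]
          rw [List.dropWhile_cons_of_pos (by simp [hcf]), hda, hta, List.reverse_reverse]

theorem check_ping_spec : Claim_equal_check_ping := by
  intro s _
  show check_ping s = check_ping_alt s
  rw [check_ping, check_ping_alt, pvALoop_false, pvBLoop_spec _ [] [] (by simp)]
  simp only [List.nil_append]
  by_cases hany : s.toList.any pvP = true
  · rw [if_pos hany, pvS]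
  · have : s.toList.reverse.dropWhile (fun c => !pvP c) = [] :=
      pvDropWhile_none _ (by simpa using hany)
    rw [if_neg hany, this]
    simp
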